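-- pv_equiv track=rewrite | github.com/birhanu-ma/A2SV-Solved-Questions | this-is-the-last-time.py | lastTime
-- ===== SOURCE A (Python) =====
-- import heapq
--
-- def lastTime(first_line, second_line):
--     second_line.sort()
--
--     n = first_line[0]
--     obt_coin = first_line[1]
--     available_rewards = []
--     ptr = 0
--
--     while True:
--         while ptr < n and second_line[ptr][0] <= obt_coin:
--             l, r, real = second_line[ptr]
--             if obt_coin <= r and real > obt_coin:
--                 heapq.heappush(available_rewards, -real)
--             ptr += 1
--
--         found_upgrade = False
--         while available_rewards:
--             best_reward = -heapq.heappop(available_rewards)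
--             if best_reward > obt_coin:
--                 obt_coin = best_reward
--                 found_upgrade = True
--                 break
--
--         if not found_upgrade:
--             break
--
--     return obt_coin
-- ===== SOURCE B (Python) =====
-- def _climb(coin, rows, avail):
--     reached = [row for row in rows if row[0] <= coin]
--     rest = [row for row in rows if row[0] > coin]
--     avail = avail + [real for l, r, real in reached if coin <= r and real > coin]
--     best = max(avail, default=coin)
--     if best > coin:
--         return _climb(best, rest, avail)
--     return coin
--
-- def lastTime(first_line, second_line):
--     second_line.sort()
--     n = first_line[0]
--     rows = second_line[:n] if n > 0 else []
--     return _climb(first_line[1], rows, [])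
-- ===== Notes on version B (the rewrite author's own statement) =====
-- stated objective: simpler
-- what changed: Replaces A's scan pointer plus priority queue with pop-until-greater loop and found_upgrade flag by a recursive round function that splits the remaining rows with two filters, collects qualifying rewards into a plain list and takes max(avail, default=coin) to decide the next coin or stop.
-- outside the precondition, e.g. on lastTime([2, 0], [[5, 6, 7]]): A returns 0, B returns 0; on lastTime([1, 0], [[5, 2]]): A returns 0, B returns 0
import Mathlib
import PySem

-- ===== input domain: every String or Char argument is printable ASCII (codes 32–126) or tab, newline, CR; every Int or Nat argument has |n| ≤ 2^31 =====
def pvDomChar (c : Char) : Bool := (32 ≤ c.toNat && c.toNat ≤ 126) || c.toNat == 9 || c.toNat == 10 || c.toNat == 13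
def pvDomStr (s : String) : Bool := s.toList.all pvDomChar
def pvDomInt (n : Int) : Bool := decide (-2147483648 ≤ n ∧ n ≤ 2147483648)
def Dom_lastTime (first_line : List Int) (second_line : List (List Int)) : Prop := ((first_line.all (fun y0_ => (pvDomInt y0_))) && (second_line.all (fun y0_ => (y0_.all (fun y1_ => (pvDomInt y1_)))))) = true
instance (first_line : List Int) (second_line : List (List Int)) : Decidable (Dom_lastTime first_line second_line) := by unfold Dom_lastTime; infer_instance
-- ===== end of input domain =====

-- B replaces A's scan pointer + heap (pop-until-greater loop, found_upgrade flag) by recursive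
-- rounds that split the remaining rows with two filters and take max(avail, default=coin).
-- Both Pythons sort second_line in place (same side effect); the equivalence proved here is
-- about the return value.

-- ===== PORT A =====
-- heapq is modelled by its priority-queue contract: the heap list is kept sorted ascending,
-- heappush = ordered insertion, heappop = take the head (the minimum). This is exact for the
-- values A observes: A only looks at popped values and heap emptiness, both determined by the
-- heap's multiset of elements, and Python's pops also deliver the elements in ascending order.
def lastTimeHeapPush (x : Int) (heap : List Int) : List Int :=
  List.orderedInsert (· ≤ ·) x heap

-- the inner 'while ptr < n and second_line[ptr][0] <= obt_coin' loop of A;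
-- state (rest, k, heap) stands for (second_line[ptr:], n - ptr, available_rewards)
def lastTimeAdvA (obt : Int) : List (List Int) → Int → List Int → List (List Int) × Int × List Int
  | [], k, heap => ([], k, heap)            -- ptr reached len(second_line): Python raises if k > 0 (outside Pre_)
  | row :: rs, k, heap =>
    if 0 < k then
      match row with
      | [l, r, real] =>
        if l ≤ obt then
          lastTimeAdvA obt rs (k - 1) (if obt ≤ r ∧ real > obt then lastTimeHeapPush (-real) heap else heap)
        else (row :: rs, k, heap)
      | _ => (row :: rs, k, heap)           -- 'l, r, real = …' raises on such a row (outside Pre_)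
    else (row :: rs, k, heap)

-- the 'while available_rewards: best = -heappop(...)' loop: none = no upgrade found (and the
-- heap was drained), some (best, rest-of-heap) = first popped value with best > obt_coin
def lastTimePopLoop (obt : Int) : List Int → Option (Int × List Int)
  | [] => none
  | h :: t => if -h > obt then some (-h, t) else lastTimePopLoop obt t

-- the outer 'while True'; the fuel only makes the recursion total: each upgrading round pops
-- at least one element and the pushes are bounded by second_line.length, so
-- second_line.length + 1 rounds always suffice
def lastTimeRoundsA (fuel : Nat) (obt : Int) (rest : List (List Int)) (k : Int) (heap : List Int) : Int :=
  match fuel with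
  | 0 => obt
  | fuel + 1 =>
    match lastTimeAdvA obt rest k heap with
    | (rest', k', heap') =>
      match lastTimePopLoop obt heap' with
      | none => obt
      | some (obt2, heap2) => lastTimeRoundsA fuel obt2 rest' k' heap2

def lastTime (first_line : List Int) (second_line : List (List Int)) : Int :=
  match first_line with
  | n :: obt :: _ =>
    lastTimeRoundsA (second_line.length + 1) obt (PySem.List.sorted second_line (fun x => x) false) n []
  | _ => 0                                   -- first_line[0]/[1] raises IndexError (outside Pre_)

-- ===== PORT B =====
-- '[real for l, r, real in reached if coin <= r and real > coin]'; the unpacking raises on a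
-- row that is not a triple (outside Pre_)
def lastTimeGains (coin : Int) (reached : List (List Int)) : List Int :=
  reached.filterMap (fun row =>
    match row with
    | [_, r, real] => if coin ≤ r ∧ real > coin then some real else none
    | _ => none)

-- _climb: one recursive round = split rows by 'row[0] <= coin' / 'row[0] > coin' (row[0] ported
-- as headD 0; row[0] raises on an empty row, outside Pre_), extend avail, compare
-- max(avail, default=coin) with coin. The fuel only makes the recursion total: every recursing
-- round consumes at least one row, so second_line.length + 1 rounds always suffice.
def lastTimeClimb : Nat → Int → List (List Int) → List Int → Int
  | 0, coin, _, _ => coin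
  | fuel + 1, coin, rows, avail =>
    let avail' := avail ++ lastTimeGains coin (rows.filter (fun row => decide (row.headD 0 ≤ coin)))
    match PySem.List.max? avail' (fun x => x) with
    | none => coin                          -- max(avail, default=coin) = coin, not > coin
    | some best =>
      if best > coin then
        lastTimeClimb fuel best (rows.filter (fun row => decide (coin < row.headD 0))) avail'
      else coin

def lastTime_alt (first_line : List Int) (second_line : List (List Int)) : Int :=
  match first_line with
  | n :: coin :: _ =>
    let s := PySem.List.sorted second_line (fun x => x) false
    lastTimeClimb (second_line.length + 1) coin
      (if 0 < n then PySem.List.slice s none (some n) else []) []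
  | _ => 0                                   -- first_line[0]/[1] raises IndexError (outside Pre_)

-- ===== PRECONDITION & SPEC =====
-- Pre_ excludes the inputs where A raises (first_line shorter than 2; with n = first_line[0] > 0,
-- rows the pointer may reach that are not int triples, or n > len(second_line) letting the pointer
-- run off the end); the closed-form bound keeps a few inputs out on which A happens to stop and
-- return before reaching the offending row — see the cited examples.
def Pre_lastTime (first_line : List Int) (second_line : List (List Int)) : Prop :=
  2 ≤ first_line.length ∧
  (0 < first_line.getD 0 0 →
    first_line.getD 0 0 ≤ (second_line.length : Int) ∧ ∀ row ∈ second_line, row.length = 3)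
instance (first_line : List Int) (second_line : List (List Int)) : Decidable (Pre_lastTime first_line second_line) := by unfold Pre_lastTime; infer_instance

def pvWitness_lastTime : List Int × List (List Int) := ([1, 0], [[0, 5, 3]])

def Spec_lastTime (first_line : List Int) (second_line : List (List Int)) (out : Int) : Prop := out = lastTime_alt first_line second_line
instance (first_line : List Int) (second_line : List (List Int)) (out : Int) : Decidable (Spec_lastTime first_line second_line out) := by unfold Spec_lastTime; infer_instance

-- ===== CLAIM (what is proved, stated in full; the proofs are below) =====
def Claim_equal_lastTime : Prop := ∀ (first_line : List Int) (second_line : List (List Int)), Dom_lastTime first_line second_line → Pre_lastTime first_line second_line → Spec_lastTime first_line second_line (lastTime first_line second_line)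

-- ===== LEMMAS AND PROOFS =====

-- the prefix of rows A's pointer consumes in one round
def lastTimeScan (coin : Int) (rows : List (List Int)) : List (List Int) :=
  rows.takeWhile (fun row => decide (row.headD 0 ≤ coin))

-- the invariant tying A's heap to B's list: for every threshold c the coin can only grow past,
-- the rewards above c stored in the heap (as negatives) and in avail agree as multisets
def lastTimeInv (obt : Int) (heap avail : List Int) : Prop :=
  ∀ c : Int, obt ≤ c →
    ((heap.map (fun h => -h)).filter (fun x => c < x)).Perm (avail.filter (fun x => c < x))

-- A's one-round scan, characterised by the takeWhile prefix of the first k rows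
theorem lastTime_advA_scan (obt : Int) :
    ∀ (rest : List (List Int)) (k : Int) (heap : List Int),
      0 ≤ k → k.toNat ≤ rest.length →
      (∀ row ∈ rest.take k.toNat, row.length = 3) →
      lastTimeAdvA obt rest k heap =
        (rest.drop (lastTimeScan obt (rest.take k.toNat)).length,
         k - ((lastTimeScan obt (rest.take k.toNat)).length : Int),
         (lastTimeGains obt (lastTimeScan obt (rest.take k.toNat))).foldl
           (fun h x => lastTimeHeapPush (-x) h) heap) := by
  intro rest
  induction rest with
  | nil =>
    intro k heap h0 hk _
    have : k = 0 := by simp only [List.length_nil] at hk; omega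
    subst this
    simp [lastTimeAdvA, lastTimeScan, lastTimeGains]
  | cons row rs ih =>
    intro k heap h0 hk h3
    by_cases hkpos : 0 < k
    · have htake : (row :: rs).take k.toNat = row :: rs.take (k - 1).toNat := by
        have : k.toNat = (k - 1).toNat + 1 := by omega
        rw [this, List.take_succ_cons]
      obtain ⟨l, r, real, hrow⟩ := List.length_eq_three.mp
        (h3 row (by rw [htake]; exact List.mem_cons_self ..))
      subst hrow
      by_cases hl : l ≤ obt
      · have ih' := ih (k - 1)
          (if obt ≤ r ∧ real > obt then lastTimeHeapPush (-real) heap else heap)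
          (by omega) (by simp only [List.length_cons] at hk; omega)
          (fun q hq => h3 q (by rw [htake]; exact List.mem_cons_of_mem _ hq))
        rw [htake]
        simp only [lastTimeScan] at ih' ⊢
        simp only [List.takeWhile_cons, List.headD_cons, hl, decide_true, if_true]
        have hA : lastTimeAdvA obt ([l, r, real] :: rs) k heap =
            lastTimeAdvA obt rs (k - 1)
              (if obt ≤ r ∧ real > obt then lastTimeHeapPush (-real) heap else heap) := by
          simp [lastTimeAdvA, hkpos, hl]
        rw [hA, ih']
        refine Prod.ext ?_ (Prod.ext ?_ ?_)
        · simp [List.drop_succ_cons]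
        · simp only [List.length_cons]
          push_cast
          ring
        · simp only [lastTimeGains, List.filterMap_cons]
          by_cases hc : obt ≤ r ∧ real > obt
          · simp [hc, List.foldl_cons]
          · simp [hc]
      · have hscan : List.takeWhile (fun row => decide (row.headD 0 ≤ obt))
            ([l, r, real] :: rs.take (k - 1).toNat) = [] := by
          simp [hl]
        rw [htake]
        simp only [lastTimeScan, hscan]
        simp [lastTimeAdvA, hkpos, hl, lastTimeGains]
    · have hz : k.toNat = 0 := by omega
      simp [lastTimeAdvA, hkpos, lastTimeScan, lastTimeGains, hz]

theorem lastTime_head_le_of_le (a b : List Int) (ha : a ≠ []) (hb : b ≠ []) (h : a ≤ b) :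
    a.headD 0 ≤ b.headD 0 := by
  match a, b with
  | x :: xs, y :: ys =>
    rcases lt_or_eq_of_le h with h | h
    · rw [List.cons_lt_cons_iff] at h
      rcases h with h | ⟨h, _⟩
      · simpa using le_of_lt h
      · simpa using le_of_eq h
    · rw [h]

-- on a lex-sorted list of triples, the rows with row[0] ≤ coin form exactly the takeWhile prefix
theorem lastTime_filter_le_eq_scan (coin : Int) :
    ∀ rows : List (List Int), (∀ row ∈ rows, row ≠ []) → rows.Pairwise (· ≤ ·) →
      rows.filter (fun row => decide (row.headD 0 ≤ coin)) = lastTimeScan coin rows := by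
  intro rows
  induction rows with
  | nil => intro _ _; rfl
  | cons x xs ih =>
    intro hne hp
    rw [List.pairwise_cons] at hp
    by_cases hx : x.headD 0 ≤ coin
    · simp only [lastTimeScan, List.filter_cons, List.takeWhile_cons, hx, decide_true, if_true]
      rw [ih (fun q hq => hne q (List.mem_cons_of_mem _ hq)) hp.2]
      rfl
    · have hd : decide (x.headD 0 ≤ coin) = false := by simpa using hx
      simp only [lastTimeScan, List.filter_cons, List.takeWhile_cons, hd, Bool.false_eq_true,
        if_false]
      refine List.filter_eq_nil_iff.mpr (fun q hq => ?_)
      have hle := lastTime_head_le_of_le x q (hne x (List.mem_cons_self ..))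
        (hne q (List.mem_cons_of_mem _ hq)) (hp.1 q hq)
      simp only [decide_eq_true_eq]
      omega

theorem lastTime_filter_gt_eq_drop (coin : Int) :
    ∀ rows : List (List Int), (∀ row ∈ rows, row ≠ []) → rows.Pairwise (· ≤ ·) →
      rows.filter (fun row => decide (coin < row.headD 0)) =
        rows.drop (lastTimeScan coin rows).length := by
  intro rows
  induction rows with
  | nil => intro _ _; rfl
  | cons x xs ih =>
    intro hne hp
    rw [List.pairwise_cons] at hp
    by_cases hx : x.headD 0 ≤ coin
    · have hd : decide (coin < x.headD 0) = false := decide_eq_false (by omega)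
      simp only [lastTimeScan, List.filter_cons, List.takeWhile_cons, hx, decide_true, if_true,
        hd, Bool.false_eq_true, if_false, List.length_cons, List.drop_succ_cons]
      simpa [lastTimeScan] using ih (fun q hq => hne q (List.mem_cons_of_mem _ hq)) hp.2
    · have hd : decide (x.headD 0 ≤ coin) = false := by simpa using hx
      simp only [lastTimeScan, List.takeWhile_cons, hd, Bool.false_eq_true, if_false,
        List.length_nil, List.drop_zero]
      refine List.filter_eq_self.mpr (fun q hq => ?_)
      rcases List.mem_cons.mp hq with rfl | hq'
      · simp only [decide_eq_true_eq]; omega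
      · have hle := lastTime_head_le_of_le x q (hne x (List.mem_cons_self ..))
          (hne q (List.mem_cons_of_mem _ hq')) (hp.1 q hq')
        simp only [decide_eq_true_eq]
        omega

theorem lastTime_pushes_sorted (p : List Int) :
    ∀ heap : List Int, heap.Pairwise (· ≤ ·) →
      (p.foldl (fun h x => lastTimeHeapPush (-x) h) heap).Pairwise (· ≤ ·) := by
  induction p with
  | nil => intro heap h; exact h
  | cons x p ih =>
    intro heap h
    exact ih _ (List.Pairwise.orderedInsert (-x) heap h)

theorem lastTime_pushes_perm (p : List Int) :
    ∀ heap : List Int,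
      (p.foldl (fun h x => lastTimeHeapPush (-x) h) heap).Perm (p.map (fun x => -x) ++ heap) := by
  induction p with
  | nil => intro heap; simp
  | cons x p ih =>
    intro heap
    refine (ih (lastTimeHeapPush (-x) heap)).trans ?_
    refine (List.Perm.append_left _ (List.perm_orderedInsert _ _ _)).trans ?_
    simp

theorem lastTime_inv_adv (obt : Int) (heap avail p : List Int)
    (hinv : lastTimeInv obt heap avail) :
    lastTimeInv obt (p.foldl (fun h x => lastTimeHeapPush (-x) h) heap) (avail ++ p) := by
  intro c hc
  have hmap : ((p.foldl (fun h x => lastTimeHeapPush (-x) h) heap).map (fun h => -h)).Perm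
      (p ++ heap.map (fun h => -h)) := by
    have := (lastTime_pushes_perm p heap).map (fun h : Int => -h)
    simpa [List.map_map, Function.comp] using this
  refine (hmap.filter _).trans ?_
  rw [List.filter_append, List.filter_append]
  refine (List.perm_append_comm.trans ?_)
  exact List.Perm.append_right _ (hinv c hc)

theorem lastTime_popLoop_none_iff (obt : Int) (heap : List Int) :
    lastTimePopLoop obt heap = none ↔ ∀ x ∈ heap, -x ≤ obt := by
  induction heap with
  | nil => simp [lastTimePopLoop]
  | cons h t ih =>
    simp only [lastTimePopLoop]
    by_cases hh : -h > obt
    · rw [if_pos hh]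
      constructor
      · intro hcontra; exact absurd hcontra (by simp)
      · intro hall; exact absurd (hall h (by simp)) (by omega)
    · rw [if_neg hh, ih]
      constructor
      · intro hall x hx
        rcases List.mem_cons.mp hx with rfl | hx
        · omega
        · exact hall x hx
      · intro hall x hx; exact hall x (List.mem_cons_of_mem _ hx)

theorem lastTime_popLoop_some (obt v : Int) (t heap : List Int)
    (hs : heap.Pairwise (· ≤ ·)) (hp : lastTimePopLoop obt heap = some (v, t)) :
    heap = (-v) :: t ∧ obt < v := by
  match heap with
  | [] => simp [lastTimePopLoop] at hp
  | h :: t' =>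
    by_cases hgt : -h > obt
    · simp only [lastTimePopLoop, if_pos hgt, Option.some.injEq, Prod.mk.injEq] at hp
      obtain ⟨hv, ht⟩ := hp
      subst ht
      exact ⟨by rw [← hv, neg_neg], by omega⟩
    · exfalso
      simp only [lastTimePopLoop, if_neg hgt] at hp
      have hnone : lastTimePopLoop obt t' = none := by
        rw [lastTime_popLoop_none_iff]
        intro x hx
        have h1 : h ≤ x := (List.pairwise_cons.mp hs).1 x hx
        omega
      rw [hnone] at hp
      simp at hp

-- the round-by-round equivalence: A's (rest, k, heap) against B's (rest.take k, avail)
theorem lastTime_rounds_eq :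
    ∀ (fuel : Nat) (obt : Int) (rest : List (List Int)) (k : Int) (heap avail : List Int),
      0 ≤ k → k.toNat ≤ rest.length →
      (∀ row ∈ rest.take k.toNat, row.length = 3) →
      (rest.take k.toNat).Pairwise (· ≤ ·) →
      heap.Pairwise (· ≤ ·) → lastTimeInv obt heap avail →
      lastTimeRoundsA fuel obt rest k heap = lastTimeClimb fuel obt (rest.take k.toNat) avail := by
  intro fuel
  induction fuel with
  | zero => intro obt rest k heap avail _ _ _ _ _ _; rfl
  | succ fuel ih =>
    intro obt rest k heap avail h0 hk h3 hlex hs hinv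
    have hne : ∀ row ∈ rest.take k.toNat, row ≠ [] := by
      intro q hq hnil
      have := h3 q hq
      rw [hnil] at this
      simp at this
    have hlenrows : (rest.take k.toNat).length = k.toNat := by
      rw [List.length_take]
      omega
    have hmle : (lastTimeScan obt (rest.take k.toNat)).length ≤ k.toNat := by
      have := (List.takeWhile_sublist
        (l := rest.take k.toNat) (p := fun row => decide (row.headD 0 ≤ obt))).length_le
      rw [hlenrows] at this
      exact this
    simp only [lastTimeRoundsA, lastTimeClimb]
    rw [lastTime_advA_scan obt rest k heap h0 hk h3,
      lastTime_filter_le_eq_scan obt (rest.take k.toNat) hne hlex,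
      lastTime_filter_gt_eq_drop obt (rest.take k.toNat) hne hlex]
    have hs' : ((lastTimeGains obt (lastTimeScan obt (rest.take k.toNat))).foldl
        (fun h x => lastTimeHeapPush (-x) h) heap).Pairwise (· ≤ ·) :=
      lastTime_pushes_sorted _ heap hs
    have hinv' : lastTimeInv obt
        ((lastTimeGains obt (lastTimeScan obt (rest.take k.toNat))).foldl
          (fun h x => lastTimeHeapPush (-x) h) heap)
        (avail ++ lastTimeGains obt (lastTimeScan obt (rest.take k.toNat))) :=
      lastTime_inv_adv obt heap avail _ hinv
    set T := lastTimeScan obt (rest.take k.toNat) with hT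
    set heap' := (lastTimeGains obt T).foldl (fun h x => lastTimeHeapPush (-x) h) heap with hH
    set avail' := avail ++ lastTimeGains obt T with hA
    cases hpop : lastTimePopLoop obt heap' with
    | none =>
      have hall := (lastTime_popLoop_none_iff obt heap').mp hpop
      have hAnil : (heap'.map (fun h => -h)).filter (fun x => obt < x) = [] := by
        rw [List.filter_eq_nil_iff]
        intro y hy
        obtain ⟨z, hz, hzy⟩ := List.mem_map.mp hy
        have := hall z hz
        simp only [decide_eq_true_eq]
        omega
      have hBnil : avail'.filter (fun x => obt < x) = [] := by
        have hperm := hinv' obt le_rfl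
        rw [hAnil] at hperm
        exact hperm.symm.eq_nil
      cases hmax : PySem.List.max? avail' (fun x => x) with
      | none => rfl
      | some best =>
        have hbmem := PySem.List.max?_mem hmax
        show obt = if best > obt then
            lastTimeClimb fuel best ((rest.take k.toNat).drop T.length) avail' else obt
        rw [if_neg (by
          intro hgt
          have hmem2 : best ∈ avail'.filter (fun x => obt < x) :=
            List.mem_filter.mpr ⟨hbmem, by simp only [decide_eq_true_eq]; omega⟩
          rw [hBnil] at hmem2
          exact List.not_mem_nil hmem2)]
    | some vt =>
      obtain ⟨v, t⟩ := vt
      obtain ⟨hheap, hv⟩ := lastTime_popLoop_some obt v t heap' hs' hpop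
      have hge_t : ∀ z ∈ t, -v ≤ z := by
        rw [hheap] at hs'
        exact (List.pairwise_cons.mp hs').1
      have hfa : (heap'.map (fun h => -h)).filter (fun x => obt < x) =
          v :: (t.map (fun h => -h)).filter (fun x => obt < x) := by
        rw [hheap]; simp [hv]
      have hperm := hinv' obt le_rfl
      rw [hfa] at hperm
      have hvmem : v ∈ avail'.filter (fun x => obt < x) :=
        hperm.mem_iff.mp (List.mem_cons_self ..)
      cases hmax : PySem.List.max? avail' (fun x => x) with
      | none =>
        exfalso
        rw [PySem.List.max?_eq_none_iff] at hmax
        rw [hmax] at hvmem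
        exact List.not_mem_nil hvmem
      | some best =>
        have hvle : v ≤ best :=
          PySem.List.max?_isMax hmax v (List.mem_filter.mp hvmem).1
        have hbgt : obt < best := by omega
        have hble : best ≤ v := by
          have hm' : best ∈ v :: (t.map (fun h => -h)).filter (fun x => obt < x) :=
            hperm.mem_iff.mpr (List.mem_filter.mpr
              ⟨PySem.List.max?_mem hmax, by simp only [decide_eq_true_eq]; omega⟩)
          rcases List.mem_cons.mp hm' with rfl | hm'
          · exact le_rfl
          · rw [List.mem_filter] at hm'
            obtain ⟨hm1, _⟩ := hm'
            obtain ⟨z, hz, hzm⟩ := List.mem_map.mp hm1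
            have := hge_t z hz
            omega
        have hbv : best = v := le_antisymm hble hvle
        show lastTimeRoundsA fuel v (rest.drop T.length) (k - (T.length : Int)) t =
          if best > obt then
            lastTimeClimb fuel best ((rest.take k.toNat).drop T.length) avail' else obt
        rw [if_pos (by omega : best > obt)]
        subst hbv
        -- both sides recurse; line up B's remaining rows with A's (rest.drop m, k - m)
        have hdrop : (rest.take k.toNat).drop T.length =
            (rest.drop T.length).take ((k - (T.length : Int)).toNat) := by
          rw [List.drop_take]
          congr 1
          omega
        rw [hdrop]
        -- re-establish every invariant for the next round
        have hsub : ((rest.take k.toNat).drop T.length).Sublist (rest.take k.toNat) :=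
          List.drop_sublist ..
        rw [hdrop] at hsub
        have ht : t.Pairwise (· ≤ ·) := by
          rw [hheap] at hs'
          exact hs'.tail
        have hinv'' : lastTimeInv best t avail' := by
          intro c hc
          have h0' := hinv' c (by omega)
          rw [hheap] at h0'
          simpa [List.filter_cons, show ¬ (c < best) by omega] using h0'
        exact ih best (rest.drop T.length) (k - (T.length : Int)) t avail'
          (by omega)
          (by rw [List.length_drop]; omega)
          (fun q hq => h3 q (hsub.subset hq))
          (hlex.sublist hsub)
          ht hinv''

theorem lastTime_eq_alt (first_line : List Int) (second_line : List (List Int))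
    (hpre : Pre_lastTime first_line second_line) :
    lastTime first_line second_line = lastTime_alt first_line second_line := by
  obtain ⟨hlen, hrest⟩ := hpre
  match first_line with
  | [] => simp at hlen
  | [x] => simp at hlen
  | n :: obt :: tl =>
    simp only [lastTime, lastTime_alt]
    by_cases hn : 0 < n
    · obtain ⟨hnle, h3all⟩ := hrest (by simpa using hn)
      rw [if_pos hn, PySem.List.slice_to _ (hb := le_of_lt hn)]
      refine lastTime_rounds_eq _ obt _ n [] [] (le_of_lt hn) ?_ ?_ ?_ List.Pairwise.nil
        (fun c _ => by simp)
      · rw [PySem.List.length_sorted]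
        simp only [List.getD_cons_zero] at hnle
        omega
      · intro q hq
        refine h3all q ?_
        have hq' : q ∈ PySem.List.sorted second_line (fun x => x) false :=
          List.take_subset _ _ hq
        rw [PySem.List.mem_sorted] at hq'
        exact hq'
      · have hp := PySem.List.sorted_pairwise (κ := List Int) second_line (fun x => x)
        have he : @PySem.List.sorted (List Int) (List Int) _ LinearOrder.toDecidableLT
              second_line (fun x => x) false
            = @PySem.List.sorted (List Int) (List Int) _ (fun a b => a.decidableLT b)
              second_line (fun x => x) false := by
          congr 1
        rw [he] at hp
        exact hp.sublist (List.take_sublist ..)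
    · rw [if_neg hn]
      cases PySem.List.sorted second_line (fun x => x) false with
      | nil =>
        simp [lastTimeRoundsA, lastTimeAdvA, lastTimePopLoop, lastTimeClimb, lastTimeGains,
          PySem.List.max?]
      | cons a as =>
        simp [lastTimeRoundsA, lastTimeAdvA, hn, lastTimePopLoop, lastTimeClimb, lastTimeGains,
          PySem.List.max?]

-- ===== VERDICT (by name: the statement is the Claim_ definition above) =====
theorem lastTime_spec : Claim_equal_lastTime := by
  intro first_line second_line _ hpre
  unfold Spec_lastTime
  exact lastTime_eq_alt first_line second_line hpre
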